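-- pv_equiv track=rewrite | github.com/inagetawaycar123/NeuroMatrix_AI_mrdpm | backend/summary_assembler.py | _risk_level_from_findings
-- ===== SOURCE A (Python) =====
-- from typing import Any, Callable, Dict, List, Optional, Tuple
--
-- def _risk_level_from_findings(
--     key_findings: List[Dict[str, Any]],
--     consensus: Dict[str, Any],
-- ) -> str:
--     decision = str(consensus.get("decision") or "").strip().lower()
--     if decision == "escalate":
--         return "high"
--     has_not_supported = any(
--         str(item.get("verdict") or "").lower() == "not_supported" for item in key_findings
--     )
--     if has_not_supported:
--         return "high"
--     has_warn = any(
--         str(item.get("verdict") or "").lower() in {"partially_supported", "unavailable"}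
--         for item in key_findings
--     )
--     if has_warn:
--         return "medium"
--     return "low"
-- ===== SOURCE B (Python) =====
-- _SEVERITY = {"not_supported": 2, "partially_supported": 1, "unavailable": 1}
--
--
-- def _risk_level_from_findings(key_findings, consensus):
--     if str(consensus.get("decision") or "").strip().lower() == "escalate":
--         return "high"
--     score = 0
--     for item in key_findings:
--         score = max(score, _SEVERITY.get(str(item.get("verdict") or "").lower(), 0))
--     return "high" if score == 2 else "medium" if score == 1 else "low"
-- ===== Notes on version B (the rewrite author's own statement) =====
-- stated objective: alternative
-- what changed: Replaces A's two short-circuit any-scans over key_findings by a single max-fold over a severity table {'not_supported':2,'partially_supported':1,'unavailable':1} followed by a score-to-level lookup.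
import Mathlib
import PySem

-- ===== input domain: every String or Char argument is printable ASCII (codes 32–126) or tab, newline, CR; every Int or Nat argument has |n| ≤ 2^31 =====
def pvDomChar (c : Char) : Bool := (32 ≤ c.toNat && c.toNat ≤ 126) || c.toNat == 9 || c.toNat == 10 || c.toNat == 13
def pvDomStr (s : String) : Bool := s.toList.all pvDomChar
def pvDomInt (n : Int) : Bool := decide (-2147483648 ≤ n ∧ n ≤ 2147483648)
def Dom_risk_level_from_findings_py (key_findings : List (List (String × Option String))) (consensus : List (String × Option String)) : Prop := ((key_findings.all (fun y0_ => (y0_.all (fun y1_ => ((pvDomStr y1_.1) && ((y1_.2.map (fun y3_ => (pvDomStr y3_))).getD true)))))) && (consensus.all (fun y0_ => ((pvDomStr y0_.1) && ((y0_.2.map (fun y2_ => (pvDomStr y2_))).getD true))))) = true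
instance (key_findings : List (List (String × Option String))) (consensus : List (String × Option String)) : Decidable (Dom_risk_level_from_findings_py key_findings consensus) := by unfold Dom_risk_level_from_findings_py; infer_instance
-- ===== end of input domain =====

-- B replaces A's two any-scans by a single max-fold over a severity table (objective: alternative decomposition).

-- str(d.get(k) or ""): missing key or None value both give ""
def pvGet (d : List (String × Option String)) (k : String) : Option (Option String) :=
  (d.find? (fun p => p.1 == k)).map (fun p => p.2)

def pvOrEmpty (o : Option (Option String)) : String :=
  match o with
  | some (some s) => s
  | _ => ""

-- ===== PORT A =====
def risk_level_from_findings_py (key_findings : List (List (String × Option String))) (consensus : List (String × Option String)) : String :=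
  let decision := PySem.Str.lower (PySem.Str.strip (pvOrEmpty (pvGet consensus "decision")))
  if decision == "escalate" then "high"
  else
    let has_not_supported := key_findings.any
      (fun item => PySem.Str.lower (pvOrEmpty (pvGet item "verdict")) == "not_supported")
    if has_not_supported then "high"
    else
      let has_warn := key_findings.any
        (fun item =>
          let v := PySem.Str.lower (pvOrEmpty (pvGet item "verdict"))
          v == "partially_supported" || v == "unavailable")
      if has_warn then "medium" else "low"

-- ===== PORT B =====
def pvSeverity : PySem.Dict String Int :=
  PySem.Dict.mk [("not_supported", 2), ("partially_supported", 1), ("unavailable", 1)]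

def risk_level_from_findings_py_alt (key_findings : List (List (String × Option String))) (consensus : List (String × Option String)) : String :=
  if PySem.Str.lower (PySem.Str.strip (pvOrEmpty (pvGet consensus "decision"))) == "escalate" then "high"
  else
    let score : Int := key_findings.foldl
      (fun acc item =>
        max acc (PySem.Dict.getD pvSeverity (PySem.Str.lower (pvOrEmpty (pvGet item "verdict"))) 0))
      0
    if score == 2 then "high" else if score == 1 then "medium" else "low"

-- ===== PRECONDITION & SPEC =====
def Spec_risk_level_from_findings_py (key_findings : List (List (String × Option String))) (consensus : List (String × Option String)) (out : String) : Prop := out = risk_level_from_findings_py_alt key_findings consensus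
instance (key_findings : List (List (String × Option String))) (consensus : List (String × Option String)) (out : String) : Decidable (Spec_risk_level_from_findings_py key_findings consensus out) := by unfold Spec_risk_level_from_findings_py; infer_instance

-- ===== CLAIM (what is proved, stated in full; the proofs are below) =====
def Claim_equal_risk_level_from_findings_py : Prop := ∀ (key_findings : List (List (String × Option String))) (consensus : List (String × Option String)), Dom_risk_level_from_findings_py key_findings consensus → Spec_risk_level_from_findings_py key_findings consensus (risk_level_from_findings_py key_findings consensus)

-- ===== LEMMAS AND PROOFS =====

def pvVerd (item : List (String × Option String)) : String :=
  PySem.Str.lower (pvOrEmpty (pvGet item "verdict"))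

lemma pvSeverity_getD (s : String) :
    PySem.Dict.getD pvSeverity s 0 =
      if s == "not_supported" then 2
      else if s == "partially_supported" || s == "unavailable" then 1 else 0 := by
  by_cases h1 : s = "not_supported"
  · subst h1; rfl
  by_cases h2 : s = "partially_supported"
  · subst h2; rfl
  by_cases h3 : s = "unavailable"
  · subst h3; rfl
  have b1 : ("not_supported" == s) = false := by simp [Ne.symm h1]
  have b2 : ("partially_supported" == s) = false := by simp [Ne.symm h2]
  have b3 : ("unavailable" == s) = false := by simp [Ne.symm h3]
  simp [pvSeverity, PySem.Dict.getD, PySem.Dict.get?, List.find?, h1, h2, h3, b1, b2, b3]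

lemma pvScore_fold (l : List (List (String × Option String))) (acc : Int) (hacc : 0 ≤ acc) :
    l.foldl (fun acc item => max acc (PySem.Dict.getD pvSeverity (pvVerd item) 0)) acc =
      max acc (if l.any (fun item => pvVerd item == "not_supported") then 2
        else if l.any (fun item => pvVerd item == "partially_supported" || pvVerd item == "unavailable") then 1
        else 0) := by
  induction l generalizing acc with
  | nil => simp; omega
  | cons x xs ih =>
    simp only [List.foldl_cons, List.any_cons]
    rw [ih _ (le_trans hacc (le_max_left _ _))]
    rw [pvSeverity_getD]
    clear ih
    rcases Bool.eq_false_or_eq_true (xs.any (fun item => pvVerd item == "not_supported")) with h3 | h3 <;>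
      rcases Bool.eq_false_or_eq_true (xs.any (fun item => pvVerd item == "partially_supported" || pvVerd item == "unavailable")) with h4 | h4 <;>
      simp only [h3, h4] <;>
      by_cases h1 : pvVerd x = "not_supported" <;>
      by_cases h2 : pvVerd x = "partially_supported" ∨ pvVerd x = "unavailable" <;>
      simp [h1, h2]

-- ===== VERDICT (by name: the statement is the Claim_ definition above) =====
theorem risk_level_from_findings_py_spec : Claim_equal_risk_level_from_findings_py := by
  intro key_findings consensus _
  unfold Spec_risk_level_from_findings_py risk_level_from_findings_py risk_level_from_findings_py_alt
  by_cases hd : PySem.Str.lower (PySem.Str.strip (pvOrEmpty (pvGet consensus "decision"))) = "escalate"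
  · simp [hd]
  · simp only [beq_iff_eq, hd, if_false]
    have := pvScore_fold key_findings 0 le_rfl
    simp only [pvVerd] at this
    rw [this]
    clear this
    rcases Bool.eq_false_or_eq_true (key_findings.any (fun item => PySem.Str.lower (pvOrEmpty (pvGet item "verdict")) == "not_supported")) with h3 | h3 <;>
      rcases Bool.eq_false_or_eq_true (key_findings.any (fun item =>
        PySem.Str.lower (pvOrEmpty (pvGet item "verdict")) == "partially_supported" ||
        PySem.Str.lower (pvOrEmpty (pvGet item "verdict")) == "unavailable")) with h4 | h4 <;>
      simp [h3, h4]
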